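-- pv_equiv track=rewrite | github.com/RaymondSHANG/leecode | q3.py | solution
-- ===== SOURCE A (Python) =====
-- def solution(T):
--     # write your code in Python 3.6
--     Nlen = len(T)
--     i, j = 0, Nlen-1
--     currentlen = 0
--     maxleft = T[i]
--     newmax = maxleft
--     #minright = T[j]
--     for i in range(1,Nlen):
--         if T[i] > newmax:
--             newmax = T[i]
--         if T[i] <= maxleft:
--             currentlen = i
--             maxleft = newmax
--     return currentlen+1
-- ===== SOURCE B (Python) =====
-- def solution(T):
--     n = len(T)
--     smin = [0] * n
--     for i in range(n - 1, -1, -1):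
--         smin[i] = T[i] if i == n - 1 else min(T[i], smin[i + 1])
--     if n == 0:
--         return 0
--     pmax = T[0]
--     for L in range(1, n):
--         pmax = max(pmax, T[L - 1])
--         if pmax < smin[L]:
--             return L
--     return n
-- ===== Notes on version B (the rewrite author's own statement) =====
-- stated objective: alternative
-- what changed: A finds the leftmost partition with one forward pass that keeps a running max and resets a candidate length on every non-increase; B instead builds a suffix-minimum table in a backward pass and then sweeps forward with a prefix maximum, returning the first cut L where prefix-max < suffix-min (falling back to n).
import Mathlib
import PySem

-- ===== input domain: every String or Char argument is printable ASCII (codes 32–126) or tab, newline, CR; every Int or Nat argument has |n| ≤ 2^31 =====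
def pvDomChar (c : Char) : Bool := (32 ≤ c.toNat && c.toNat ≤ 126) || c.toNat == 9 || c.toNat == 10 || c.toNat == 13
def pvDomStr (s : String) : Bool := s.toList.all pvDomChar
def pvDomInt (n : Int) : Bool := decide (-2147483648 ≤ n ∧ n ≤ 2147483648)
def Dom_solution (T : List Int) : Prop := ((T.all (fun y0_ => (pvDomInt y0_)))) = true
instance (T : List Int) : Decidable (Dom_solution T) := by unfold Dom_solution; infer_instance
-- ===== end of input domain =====

-- B replaces A's single running-max pass by a backward suffix-minimum pass plus a forward
-- prefix-maximum sweep that returns the first cut where prefix-max < suffix-min (alternative decomposition, same O(n) cost).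

-- ===== PORT A =====
def solution (T : List Int) : Int :=
  let Nlen : Int := T.length
  let maxleft : Int := PySem.List.pyGetD T 0 0
  let st := (PySem.List.pyRange 1 Nlen 1).foldl
    (fun (st : Int × Int × Int) (i : Int) =>
      let ti := PySem.List.pyGetD T i 0
      let newmax := if ti > st.2.2 then ti else st.2.2
      if ti ≤ st.2.1 then (i, newmax, newmax) else (st.1, st.2.1, newmax))
    (0, maxleft, maxleft)
  st.1 + 1

-- ===== PORT B =====
-- backward pass: sminB T is the list with (sminB T)[i] = min(T[i:]), built as smin[i] = min(T[i], smin[i+1])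
def sminB : List Int → List Int
  | [] => []
  | x :: rest => match sminB rest with
    | [] => [x]
    | m :: ms => min x m :: m :: ms

-- forward sweep with early return (Source B's `for L in range(1, n): ... return L` / `return n`)
def altLoop (T smin : List Int) (n : Int) : Int → List Int → Int
  | _, [] => n
  | pmax, L :: rest =>
      let pmax' := max pmax (PySem.List.pyGetD T (L - 1) 0)
      if pmax' < PySem.List.pyGetD smin L 0 then L
      else altLoop T smin n pmax' rest

def solution_alt (T : List Int) : Int :=
  let n : Int := T.length
  let smin := sminB T
  if n == 0 then 0
  else altLoop T smin n (PySem.List.pyGetD T 0 0) (PySem.List.pyRange 1 n 1)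

-- ===== PRECONDITION & SPEC =====
-- A reads T[0] before its loop, so it raises IndexError on the empty list: Pre_ excludes exactly that.
def Pre_solution (T : List Int) : Prop := T ≠ []
instance (T : List Int) : Decidable (Pre_solution T) := by unfold Pre_solution; infer_instance
def pvWitness_solution : List Int := ([3, 1, 2])

def Spec_solution (T : List Int) (out : Int) : Prop := out = solution_alt T
instance (T : List Int) (out : Int) : Decidable (Spec_solution T out) := by unfold Spec_solution; infer_instance

-- ===== CLAIM (what is proved, stated in full; the proofs are below) =====
def Claim_equal_solution : Prop := ∀ (T : List Int), Dom_solution T → Pre_solution T → Spec_solution T (solution T)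


-- ===== LEMMAS AND PROOFS =====

-- A's loop body, named so the proofs can speak about it (definitionally the lambda in `solution`)
def stepA (T : List Int) (st : Int × Int × Int) (i : Int) : Int × Int × Int :=
  let ti := PySem.List.pyGetD T i 0
  let newmax := if ti > st.2.2 then ti else st.2.2
  if ti ≤ st.2.1 then (i, newmax, newmax) else (st.1, st.2.1, newmax)

-- prefix maximum: pmN T k = max(T[0..k])
def pmN (T : List Int) : Nat → Int
  | 0 => T.getD 0 0
  | k+1 => max (pmN T k) (T.getD (k+1) 0)

-- minimum of a nonempty list (0 on [])
def minL : List Int → Int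
  | [] => 0
  | x :: xs => xs.foldl min x

lemma foldl_min_init (ys : List Int) : ∀ (x y : Int), ys.foldl min (min x y) = min x (ys.foldl min y) := by
  induction ys with
  | nil => intro x y; rfl
  | cons z zs ih =>
    intro x y
    simp only [List.foldl_cons]
    rw [min_assoc, ih]

lemma minL_cons_cons (x y : Int) (ys : List Int) : minL (x :: y :: ys) = min x (minL (y :: ys)) := by
  simp only [minL, List.foldl_cons]
  exact foldl_min_init ys x y

lemma lt_minL (l : List Int) (hne : l ≠ []) (x : Int) : x < minL l ↔ ∀ y ∈ l, x < y := by
  induction l with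
  | nil => exact absurd rfl hne
  | cons a l ih =>
    cases l with
    | nil => simp [minL]
    | cons b bs =>
      rw [minL_cons_cons, lt_min_iff]
      constructor
      · rintro ⟨h1, h2⟩ y hy
        rcases List.mem_cons.mp hy with rfl | hy
        · exact h1
        · exact ((ih (by simp)).mp h2) y hy
      · intro h
        exact ⟨h a (by simp), (ih (by simp)).mpr (fun y hy => h y (List.mem_cons_of_mem _ hy))⟩

lemma minL_le (l : List Int) : ∀ y ∈ l, minL l ≤ y := by
  induction l with
  | nil => simp
  | cons a l ih =>
    cases l with
    | nil => simp [minL]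
    | cons b bs =>
      intro y hy
      rw [minL_cons_cons]
      rcases List.mem_cons.mp hy with rfl | hy
      · exact min_le_left _ _
      · exact le_trans (min_le_right _ _) (ih y hy)

lemma length_sminB (l : List Int) : (sminB l).length = l.length := by
  induction l with
  | nil => rfl
  | cons x rest ih =>
    simp only [sminB]
    cases h : sminB rest with
    | nil =>
      rw [h] at ih
      simp only [List.length_nil] at ih
      simp [← ih]
    | cons m ms => rw [h] at ih; simp at ih ⊢; omega

lemma sminB_getD (l : List Int) : ∀ (k : Nat), k < l.length → (sminB l).getD k 0 = minL (l.drop k) := by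
  induction l with
  | nil => intro k hk; simp at hk
  | cons x rest ih =>
    intro k hk
    simp only [sminB]
    cases hr : sminB rest with
    | nil =>
      have : rest = [] := by
        have := length_sminB rest; rw [hr] at this; simpa using (List.length_eq_zero_iff.mp this.symm)
      subst this
      have : k = 0 := by simp at hk; omega
      subst this
      simp [minL]
    | cons m ms =>
      have hrest : rest ≠ [] := by
        intro h; subst h; simp [sminB] at hr
      have hm : m = minL rest := by
        have h0 := ih 0 (by cases rest with | nil => exact absurd rfl hrest | cons a b => simp)
        rw [hr] at h0; simpa using h0
      cases k with
      | zero =>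
        cases rest with
        | nil => exact absurd rfl hrest
        | cons b bs => simp [minL_cons_cons, hm]
      | succ k =>
        have := ih k (by simpa using Nat.lt_of_succ_lt_succ hk)
        rw [hr] at this
        simpa using this

lemma getD_le_pmN (T : List Int) : ∀ (k j : Nat), j ≤ k → T.getD j 0 ≤ pmN T k := by
  intro k
  induction k with
  | zero => intro j hj; interval_cases j; simp [pmN]
  | succ k ih =>
    intro j hj
    rcases Nat.lt_or_ge j (k+1) with h | h
    · exact le_trans (ih j (by omega)) (by simp [pmN])
    · have : j = k + 1 := by omega
      subst this; simp [pmN]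

lemma pmN_le (T : List Int) : ∀ (k : Nat) (x : Int), (∀ j, j ≤ k → T.getD j 0 ≤ x) → pmN T k ≤ x := by
  intro k
  induction k with
  | zero => intro x h; simpa [pmN] using h 0 (le_refl 0)
  | succ k ih =>
    intro x h
    simp only [pmN, max_le_iff]
    exact ⟨ih x (fun j hj => h j (by omega)), h (k+1) (le_refl _)⟩

lemma pmN_mono (T : List Int) : ∀ (k m : Nat), k ≤ m → pmN T k ≤ pmN T m := by
  intro k m hk
  exact pmN_le T k (pmN T m) (fun j hj => getD_le_pmN T m j (by omega))

lemma getD_mem_drop (l : List Int) : ∀ (k i : Nat), k ≤ i → i < l.length → l.getD i 0 ∈ l.drop k := by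
  intro k i hk hi
  have h1 : l.getD i 0 = l[i] := List.getD_eq_getElem l 0 hi
  have h2 : (l.drop k)[i - k]'(by simp; omega) = l[i] := by
    rw [List.getElem_drop]; congr 1; omega
  rw [h1, ← h2]
  exact List.getElem_mem _

lemma mem_drop_exists (l : List Int) (k : Nat) (y : Int) (hy : y ∈ l.drop k) :
    ∃ i : Nat, k ≤ i ∧ i < l.length ∧ l.getD i 0 = y := by
  rcases List.mem_iff_getElem.mp hy with ⟨j, hj, hval⟩
  refine ⟨k + j, by omega, by simp at hj; omega, ?_⟩
  rw [List.getD_eq_getElem l 0 (by simp at hj; omega), ← List.getElem_drop]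
  · exact hval

-- phase 2: once every remaining element is above maxleft, A's (currentlen, maxleft) never change
lemma frozen (T : List Int) : ∀ (R : List Int) (cl ml nm : Int),
    (∀ i ∈ R, ml < PySem.List.pyGetD T i 0) →
    (R.foldl (stepA T) (cl, ml, nm)).1 = cl := by
  intro R
  induction R with
  | nil => intro cl ml nm _; rfl
  | cons i R ih =>
    intro cl ml nm h
    simp only [List.foldl_cons]
    have hi := h i (by simp)
    simp only [stepA]
    rw [if_neg (by omega)]
    exact ih cl ml _ (fun j hj => h j (List.mem_cons_of_mem _ hj))

-- the joint loop invariant: A's fold and B's sweep agree from position a on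
lemma main_inv (T : List Int) :
    ∀ (k a : Nat), a + k = T.length → 1 ≤ a →
    ∀ (cl ml nm pmax : Int),
    0 ≤ cl → cl ≤ (a : Int) - 1 →
    ml = pmN T cl.toNat →
    nm = pmN T (a - 1) →
    (∀ i : Nat, cl < (i : Int) → i ≤ a - 1 → ml < T.getD i 0) →
    (∀ L : Nat, 1 ≤ L → L ≤ a - 1 → ¬ (pmN T (L-1) < minL (T.drop L))) →
    pmax ≤ pmN T (a - 1) →
    (∀ j : Nat, j < a - 1 → T.getD j 0 ≤ pmax) →
    ((PySem.List.pyRange (a : Int) (T.length : Int) 1).foldl (stepA T) (cl, ml, nm)).1 + 1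
      = altLoop T (sminB T) (T.length : Int) pmax (PySem.List.pyRange (a : Int) (T.length : Int) 1) := by
  intro k
  induction k with
  | zero =>
    intro a ha ha1 cl ml nm pmax hcl0 hcl1 hml hnm hI4 hI5 hp1 hp2
    have hempty : PySem.List.pyRange (a : Int) (T.length : Int) 1 = [] :=
      PySem.List.pyRange_one_eq_nil (by exact_mod_cast Nat.le_of_eq (by omega : T.length = a))
    rw [hempty]
    simp only [List.foldl_nil, altLoop]
    by_contra hne'
    have hcla : cl < (a : Int) - 1 := by
      rcases lt_or_eq_of_le hcl1 with h | h
      · exact h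
      · exact absurd (by rw [h]; omega) hne'
    have hL2 : cl.toNat + 1 ≤ a - 1 := by omega
    apply hI5 (cl.toNat + 1) (by omega) hL2
    have hdrop_ne : T.drop (cl.toNat + 1) ≠ [] := by
      intro hd
      have := List.drop_eq_nil_iff.mp hd
      omega
    have hL1 : cl.toNat + 1 - 1 = cl.toNat := by omega
    rw [hL1, ← hml, lt_minL _ hdrop_ne]
    intro y hy
    obtain ⟨i, hik, hilen, hval⟩ := mem_drop_exists T (cl.toNat + 1) y hy
    rw [← hval]
    exact hI4 i (by omega) (by omega)
  | succ k ih =>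
    intro a ha ha1 cl ml nm pmax hcl0 hcl1 hml hnm hI4 hI5 hp1 hp2
    have haln : a < T.length := by omega
    have hcons : PySem.List.pyRange (a : Int) (T.length : Int) 1
        = (a : Int) :: PySem.List.pyRange ((a : Int) + 1) (T.length : Int) 1 :=
      PySem.List.pyRange_one_cons (by exact_mod_cast haln)
    have hgetA1 : PySem.List.pyGetD T ((a : Int) - 1) 0 = T.getD (a - 1) 0 := by
      have hc : (a : Int) - 1 = ((a - 1 : Nat) : Int) := by omega
      rw [hc, PySem.List.pyGetD_natCast]
    have hpmax' : max pmax (T.getD (a - 1) 0) = pmN T (a - 1) := by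
      apply le_antisymm
      · exact max_le hp1 (getD_le_pmN T (a - 1) (a - 1) le_rfl)
      · apply pmN_le
        intro j hj
        rcases Nat.lt_or_ge j (a - 1) with h | h
        · exact le_trans (hp2 j h) (le_max_left _ _)
        · have : j = a - 1 := by omega
          rw [this]; exact le_max_right _ _
    have hsmin : PySem.List.pyGetD (sminB T) (a : Int) 0 = minL (T.drop a) := by
      rw [PySem.List.pyGetD_natCast, List.getD_eq_getElem?_getD]
      rw [← List.getD_eq_getElem?_getD]
      exact sminB_getD T a haln
    have hBstep : altLoop T (sminB T) (T.length : Int) pmax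
          ((a : Int) :: PySem.List.pyRange ((a : Int) + 1) (T.length : Int) 1)
        = if max pmax (PySem.List.pyGetD T ((a : Int) - 1) 0) < PySem.List.pyGetD (sminB T) (a : Int) 0
            then (a : Int)
            else altLoop T (sminB T) (T.length : Int)
              (max pmax (PySem.List.pyGetD T ((a : Int) - 1) 0))
              (PySem.List.pyRange ((a : Int) + 1) (T.length : Int) 1) := rfl
    rw [hcons, hBstep, hgetA1, hsmin, hpmax']
    have hmlpm : ml ≤ pmN T (a - 1) := by
      rw [hml]; exact pmN_mono T cl.toNat (a - 1) (by omega)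
    by_cases hexit : pmN T (a - 1) < minL (T.drop a)
    · rw [if_pos hexit]
      -- A's loop can never extend again: every remaining element exceeds maxleft
      have hclval : cl = (a : Int) - 1 := by
        by_contra hne'
        have hcla : cl < (a : Int) - 1 := lt_of_le_of_ne hcl1 hne'
        apply hI5 (cl.toNat + 1) (by omega) (by omega)
        have hdrop_ne : T.drop (cl.toNat + 1) ≠ [] := by
          intro hd
          have := List.drop_eq_nil_iff.mp hd
          omega
        have hL1 : cl.toNat + 1 - 1 = cl.toNat := by omega
        rw [hL1, ← hml, lt_minL _ hdrop_ne]
        intro y hy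
        obtain ⟨i, hik, hilen, hval⟩ := mem_drop_exists T (cl.toNat + 1) y hy
        rw [← hval]
        rcases Nat.lt_or_ge i a with hia | hia
        · exact hI4 i (by omega) (by omega)
        · have hmem : T.getD i 0 ∈ T.drop a := getD_mem_drop T a i hia hilen
          exact lt_of_le_of_lt hmlpm (lt_of_lt_of_le hexit (minL_le _ _ hmem))
      have hfroz : (((a : Int) :: PySem.List.pyRange ((a : Int) + 1) (T.length : Int) 1).foldl
            (stepA T) (cl, ml, nm)).1 = cl := by
        apply frozen
        intro i hi
        have hrange : (a : Int) ≤ i ∧ i < (T.length : Int) := by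
          rcases List.mem_cons.mp hi with rfl | hi'
          · exact ⟨le_refl _, by exact_mod_cast haln⟩
          · have := PySem.List.mem_pyRange_one.mp hi'
            omega
        have hcast : i = ((i.toNat : Nat) : Int) := by omega
        rw [hcast, PySem.List.pyGetD_natCast]
        have hmem : T.getD i.toNat 0 ∈ T.drop a :=
          getD_mem_drop T a i.toNat (by omega) (by omega)
        exact lt_of_le_of_lt hmlpm (lt_of_lt_of_le hexit (minL_le _ _ hmem))
      rw [hfroz, hclval]
      ring
    · rw [if_neg hexit]
      have hstep : stepA T (cl, ml, nm) (a : Int)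
          = if T.getD a 0 ≤ ml
              then ((a : Int), pmN T a, pmN T a)
              else (cl, ml, pmN T a) := by
        have hgetAa : PySem.List.pyGetD T (a : Int) 0 = T.getD a 0 := PySem.List.pyGetD_natCast T a 0
        have hnm' : (if T.getD a 0 > nm then T.getD a 0 else nm) = pmN T a := by
          have ha' : a = (a - 1) + 1 := by omega
          rw [hnm, ha']
          show _ = pmN T ((a-1)+1)
          simp only [pmN]
          rw [← ha']
          rcases le_or_gt (T.getD a 0) (pmN T (a-1)) with h | h
          · rw [if_neg (by omega), max_eq_left h]
          · rw [if_pos (by omega), max_eq_right (le_of_lt h)]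
        simp only [stepA, hgetAa, hnm']
      rw [List.foldl_cons, hstep]
      have hrange' : PySem.List.pyRange ((a : Int) + 1) (T.length : Int) 1
          = PySem.List.pyRange ((a + 1 : Nat) : Int) (T.length : Int) 1 := by push_cast; ring_nf
      rw [hrange']
      by_cases hti : T.getD a 0 ≤ ml
      · rw [if_pos hti]
        apply ih (a + 1) (by omega) (by omega) ((a : Int)) (pmN T a) (pmN T a) (pmN T (a - 1))
          (by omega) (by push_cast; omega)
          (by simp) (by simp)
          (by intro i h1 h2; omega)
          (by
            intro L hL1 hL2
            rcases Nat.lt_or_ge L a with h | h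
            · exact hI5 L hL1 (by omega)
            · have : L = a := by omega
              subst this
              exact hexit)
          (pmN_mono T (a - 1) ((a + 1) - 1) (by omega))
          (by
            intro j hj
            exact getD_le_pmN T ((a + 1) - 1 - 1) j (by omega) |>.trans
              (pmN_mono T ((a+1)-1-1) (a-1) (by omega)))
      · rw [if_neg hti]
        apply ih (a + 1) (by omega) (by omega) cl ml (pmN T a) (pmN T (a - 1))
          hcl0 (by push_cast; omega)
          hml (by simp)
          (by
            intro i h1 h2
            rcases Nat.lt_or_ge i a with h | h
            · exact hI4 i h1 (by omega)
            · have : i = a := by omega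
              subst this
              omega)
          (by
            intro L hL1 hL2
            rcases Nat.lt_or_ge L a with h | h
            · exact hI5 L hL1 (by omega)
            · have : L = a := by omega
              subst this
              exact hexit)
          (pmN_mono T (a - 1) ((a + 1) - 1) (by omega))
          (by
            intro j hj
            exact getD_le_pmN T ((a + 1) - 1 - 1) j (by omega) |>.trans
              (pmN_mono T ((a+1)-1-1) (a-1) (by omega)))

-- ===== VERDICT (by name: the statement is the Claim_ definition above) =====
theorem solution_spec : Claim_equal_solution := by
  intro T _ hpre
  unfold Spec_solution
  have hlen : 1 ≤ T.length := by
    cases T with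
    | nil => exact absurd rfl hpre
    | cons a l => simp
  have hA : solution T
      = ((PySem.List.pyRange ((1:Nat) : Int) (T.length : Int) 1).foldl (stepA T)
          (0, PySem.List.pyGetD T 0 0, PySem.List.pyGetD T 0 0)).1 + 1 := rfl
  have hB : solution_alt T
      = altLoop T (sminB T) (T.length : Int) (PySem.List.pyGetD T 0 0)
          (PySem.List.pyRange ((1:Nat) : Int) (T.length : Int) 1) := by
    unfold solution_alt
    have h0 : (((T.length : Int)) == 0) = false := by
      simp only [beq_eq_false_iff_ne, ne_eq, Int.natCast_eq_zero]
      omega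
    rw [if_neg (by rw [h0]; exact Bool.false_ne_true)]
    norm_num
  rw [hA, hB]
  have hget0 : PySem.List.pyGetD T 0 0 = pmN T 0 := by
    rw [PySem.List.pyGetD_zero]; rfl
  rw [hget0]
  exact main_inv T (T.length - 1) 1 (by omega) (le_refl 1) 0 (pmN T 0) (pmN T 0) (pmN T 0)
    (le_refl 0) (by norm_num) rfl rfl
    (by intro i h1 h2; omega)
    (by intro L h1 h2; omega)
    (le_refl _)
    (by intro j hj; omega)
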